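-- pv_equiv track=rewrite | github.com/FSASFujitsuIQC/quantum-taste-perception | modules/utils.py | group_metric
-- ===== SOURCE A (Python) =====
-- def group_metric(exp_groups,sim_group):
--     n_groups = len(exp_groups)
--     error = {}
--     for i_group in range(n_groups):
--         for mol_name in exp_groups[i_group]:
--             if mol_name in sim_group[i_group]:
--                 error[mol_name] = 0
--             else:
--                 for i in range(n_groups-1):
--                     if mol_name in sim_group[(i_group+1+i)%n_groups]:
--                         error[mol_name] = 1+i
--     return error
-- ===== SOURCE B (Python) =====
-- def group_metric(exp_groups, sim_group):
--     n = len(exp_groups)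
--     # one pass over sim_group: molecule -> list of group indices containing it
--     pos = {}
--     for j, group in enumerate(sim_group[:n]):
--         for mol in group:
--             pos.setdefault(mol, []).append(j)
--     error = {}
--     for i, group in enumerate(exp_groups):
--         for mol in group:
--             js = pos.get(mol)
--             if js is None:
--                 continue
--             if i in js:
--                 error[mol] = 0
--             else:
--                 error[mol] = max((j - i) % n for j in js)
--     return error
-- ===== Notes on version B (the rewrite author's own statement) =====
-- stated objective: faster
-- what changed: A scans, for every molecule of every expected group, all n-1 cyclic offsets with a list-membership test per step; B builds in one pass a molecule->group-indices map from sim_group and computes each molecule's distance (largest cyclic offset, matching A's last-match-wins) by a direct lookup.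
-- outside the precondition, e.g. on group_metric([[], []], []): A returns {}, B returns {}
import Mathlib
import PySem

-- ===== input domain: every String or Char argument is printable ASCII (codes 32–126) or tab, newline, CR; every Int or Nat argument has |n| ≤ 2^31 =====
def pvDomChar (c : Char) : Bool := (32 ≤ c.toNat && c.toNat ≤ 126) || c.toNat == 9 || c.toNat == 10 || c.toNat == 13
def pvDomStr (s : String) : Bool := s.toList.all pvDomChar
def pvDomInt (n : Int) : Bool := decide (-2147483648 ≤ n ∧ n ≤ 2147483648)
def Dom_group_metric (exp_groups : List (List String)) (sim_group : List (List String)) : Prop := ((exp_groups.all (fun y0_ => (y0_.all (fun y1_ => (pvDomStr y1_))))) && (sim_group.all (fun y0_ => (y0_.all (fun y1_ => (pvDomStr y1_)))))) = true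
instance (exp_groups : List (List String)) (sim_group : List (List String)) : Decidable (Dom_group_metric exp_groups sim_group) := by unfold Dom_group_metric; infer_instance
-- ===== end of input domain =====

-- B replaces A's per-molecule scan over all cyclic offsets by a one-pass molecule→group-indices
-- map built from sim_group, then a direct max-offset lookup (objective: faster).

-- ===== PORT A =====
def group_metric (exp_groups : List (List String)) (sim_group : List (List String)) : List (String × Int) :=
  let n_groups : Int := exp_groups.length
  ((PySem.List.pyRange 0 n_groups 1).foldl (fun error i_group =>
    (PySem.List.pyGetD exp_groups i_group []).foldl (fun error mol_name =>
      if (PySem.List.pyGetD sim_group i_group []).contains mol_name then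
        error.insert mol_name 0
      else
        (PySem.List.pyRange 0 (n_groups - 1) 1).foldl (fun error i =>
          if (PySem.List.pyGetD sim_group (PySem.Int.mod (i_group + 1 + i) n_groups) []).contains mol_name then
            error.insert mol_name (1 + i)
          else error) error) error)
    (PySem.Dict.empty : PySem.Dict String Int)).items

-- ===== PORT B =====
-- first loop of Source B: pos = {}; for j, group in enumerate(sim_group[:n]): for mol in group: pos.setdefault(mol, []).append(j)
def group_metric_alt_pos (n : Int) (sim_group : List (List String)) : PySem.Dict String (List Int) :=
  (PySem.List.enumerate (PySem.List.slice sim_group none (some n)) 0).foldl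
    (fun pos jg => jg.2.foldl (fun pos mol => pos.modify mol [] (fun js => js ++ [jg.1])) pos)
    PySem.Dict.empty

def group_metric_alt (exp_groups : List (List String)) (sim_group : List (List String)) : List (String × Int) :=
  let n : Int := exp_groups.length
  let pos := group_metric_alt_pos n sim_group
  ((PySem.List.enumerate exp_groups 0).foldl (fun error ig =>
    ig.2.foldl (fun error mol =>
      let js := pos.getD mol []
      if js = [] then error    -- Source B: js = pos.get(mol, []); if not js: continue
      else if js.contains ig.1 then error.insert mol 0
      else
        -- max((j - i) % n for j in js); js ≠ [] here, so the .getD 0 default is never taken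
        error.insert mol ((PySem.List.max? (js.map (fun j => PySem.Int.mod (j - ig.1) n)) (fun x => x)).getD 0))
      error)
    (PySem.Dict.empty : PySem.Dict String Int)).items

-- ===== PRECONDITION & SPEC =====
-- Pre_ requires sim_group to supply at least as many groups as exp_groups: otherwise A's
-- indexing sim_group[...] raises IndexError whenever a too-short sim_group is actually reached
-- (the excluded inputs on which A still returns are the degenerate ones whose out-of-range
-- exp groups are all empty, so that no indexing ever happens).
def Pre_group_metric (exp_groups : List (List String)) (sim_group : List (List String)) : Prop :=
  exp_groups.length ≤ sim_group.length
instance (exp_groups : List (List String)) (sim_group : List (List String)) : Decidable (Pre_group_metric exp_groups sim_group) := by unfold Pre_group_metric; infer_instance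

def pvWitness_group_metric : List (List String) × List (List String) := ([["a"], ["b"]], [["b"], ["a"]])

def Spec_group_metric (exp_groups : List (List String)) (sim_group : List (List String)) (out : List (String × Int)) : Prop := out = group_metric_alt exp_groups sim_group
instance (exp_groups : List (List String)) (sim_group : List (List String)) (out : List (String × Int)) : Decidable (Spec_group_metric exp_groups sim_group out) := by unfold Spec_group_metric; infer_instance

-- ===== CLAIM (what is proved, stated in full; the proofs are below) =====
def Claim_equal_group_metric : Prop := ∀ (exp_groups : List (List String)) (sim_group : List (List String)), Dom_group_metric exp_groups sim_group → Pre_group_metric exp_groups sim_group → Spec_group_metric exp_groups sim_group (group_metric exp_groups sim_group)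

-- ===== LEMMAS AND PROOFS =====

-- the flat (molecule, group-index) pairs B's first loop runs over
def pvPairs (sim_group : List (List String)) (n : Nat) : List (String × Int) :=
  (PySem.List.enumerate (sim_group.take n) 0).flatMap (fun jg => jg.2.map (fun mol => (mol, jg.1)))

-- the index list B stores for a molecule
def pvJs (sim_group : List (List String)) (n : Nat) (mol : String) : List Int :=
  ((pvPairs sim_group n).filter (fun p => p.1 == mol)).map (fun p => p.2)

lemma pos_getD (n : Nat) (sim_group : List (List String)) (mol : String) :
    (group_metric_alt_pos (n : Int) sim_group).getD mol [] = pvJs sim_group n mol := by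
  unfold group_metric_alt_pos pvJs pvPairs
  rw [PySem.List.slice_to_natCast]
  have hb : ∀ (acc : PySem.Dict String (List Int)) (jg : Int × List String),
      jg.2.foldl (fun pos mol => pos.modify mol [] (fun js => js ++ [jg.1])) acc
      = (jg.2.map (fun mol => (mol, jg.1))).foldl (fun d p => d.modify p.1 [] (fun js => js ++ [p.2])) acc := by
    intro acc jg; rw [List.foldl_map]
  simp only [hb]
  rw [← List.foldl_flatMap]
  rw [PySem.Dict.getD_foldl_modify_append]
  simp [PySem.Dict.getD_empty]

lemma mem_pvJs (sim_group : List (List String)) (n : Nat) (hn : n ≤ sim_group.length)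
    (mol : String) (v : Int) :
    v ∈ pvJs sim_group n mol ↔ ∃ k : Nat, k < n ∧ v = (k : Int) ∧ mol ∈ sim_group.getD k [] := by
  unfold pvJs pvPairs
  simp only [List.mem_map, List.mem_filter, List.mem_flatMap, PySem.List.mem_enumerate_iff]
  constructor
  · rintro ⟨⟨m, jj⟩, ⟨⟨⟨k2, g⟩, ⟨k, hk, heq⟩, hm⟩, hfil⟩, hv⟩
    simp only [Prod.mk.injEq, zero_add] at heq hv hfil
    obtain ⟨hk2, hg⟩ := heq
    have hkn : k < n := by simp [List.length_take] at hk; omega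
    subst hv hk2 hg
    simp only [Prod.mk.injEq] at hm
    obtain ⟨m2, hm2, hmeq, hjj⟩ := hm
    refine ⟨k, hkn, by omega, ?_⟩
    rw [List.getD_eq_getElem _ _ (by omega), ← List.getElem_take (h := hk)]
    have hmm : m2 = mol := by subst hmeq; simpa using hfil
    subst hmm; exact hm2
  · rintro ⟨k, hkn, hv, hmem⟩
    rw [List.getD_eq_getElem _ _ (by omega)] at hmem
    refine ⟨(mol, (k:Int)), ⟨⟨((k:Int), sim_group[k]), ⟨k, ?_, ?_⟩, ?_⟩, by simp⟩, by simp [hv]⟩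
    · simp [List.length_take]; omega
    · simp [List.getElem_take]
    · exact ⟨mol, hmem, rfl⟩

lemma emod_sub_left (a j N : Int) : (a % N - j) % N = (a - j) % N := by
  conv_rhs => rw [Int.sub_emod]
  rw [Int.sub_emod, Int.emod_emod_of_dvd _ dvd_rfl]

lemma emod_add_right (j k N : Int) : (j + (k - j) % N) % N = k % N := by
  conv_rhs => rw [show k = j + (k - j) by ring, Int.add_emod]
  rw [Int.add_emod, Int.emod_emod_of_dvd _ dvd_rfl]

-- a Python loop 'for i in l: if P(i): d[mol] = f(i)' keeps the LAST matching assignment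
lemma foldl_insert_if (l : List Int) (P : Int → Bool) (f : Int → Int)
    (d : PySem.Dict String Int) (mol : String) :
    l.foldl (fun e i => if P i then e.insert mol (f i) else e) d =
      match (l.filter P).getLast? with
      | none => d
      | some i => d.insert mol (f i) := by
  induction l using List.reverseRecOn generalizing d with
  | nil => simp
  | append_singleton l x ih =>
    rw [List.foldl_append, List.filter_append]
    by_cases hx : P x
    · simp only [List.foldl_cons, List.foldl_nil, hx, if_pos]
      rw [List.filter_cons_of_pos hx]
      simp only [List.filter_nil]
      rw [List.getLast?_concat, ih]
      cases hfl : (l.filter P).getLast? with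
      | none => rfl
      | some i => simp [PySem.Dict.insert_insert_self]
    · simp only [List.foldl_cons, List.foldl_nil, hx, if_neg, Bool.false_eq_true, not_false_iff]
      rw [List.filter_cons_of_neg (by simp [hx]), List.filter_nil, List.append_nil]
      exact ih d

lemma max?_congr_mem (l₁ l₂ : List Int) (h : ∀ v : Int, v ∈ l₁ ↔ v ∈ l₂) :
    PySem.List.max? l₁ (fun x => x) = PySem.List.max? l₂ (fun x => x) := by
  cases h1 : PySem.List.max? l₁ (fun x => x) with
  | none =>
    rw [PySem.List.max?_eq_none_iff] at h1
    cases h2 : PySem.List.max? l₂ (fun x => x) with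
    | none => rfl
    | some b =>
      have hb := PySem.List.max?_mem h2
      rw [← h] at hb; simp [h1] at hb
  | some a =>
    cases h2 : PySem.List.max? l₂ (fun x => x) with
    | none =>
      rw [PySem.List.max?_eq_none_iff] at h2
      have ha := PySem.List.max?_mem h1
      rw [h] at ha; simp [h2] at ha
    | some b =>
      have ha := PySem.List.max?_mem h1
      have hb := PySem.List.max?_mem h2
      have hab : a ≤ b := PySem.List.max?_isMax h2 a ((h a).mp ha)
      have hba : b ≤ a := PySem.List.max?_isMax h1 b ((h b).mpr hb)
      simp [le_antisymm hab hba]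

lemma max?_eq_getLast?_of_pairwise_lt (l : List Int) (h : l.Pairwise (· < ·)) :
    PySem.List.max? l (fun x => x) = l.getLast? := by
  induction l using List.reverseRecOn with
  | nil => simp [PySem.List.max?_eq_none_iff]
  | append_singleton l x ih =>
    rw [List.getLast?_concat]
    cases hm : PySem.List.max? (l ++ [x]) (fun x => x) with
    | none => rw [PySem.List.max?_eq_none_iff] at hm; simp at hm
    | some m =>
      have hmem := PySem.List.max?_mem hm
      have hxle : x ≤ m := PySem.List.max?_isMax hm x (by simp)
      rcases List.mem_append.mp hmem with hml | hmx
      · have : m < x := (List.pairwise_append.mp h).2.2 m hml x (by simp)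
        omega
      · simp at hmx; simp [hmx]

-- the per-molecule bodies of A and B agree
lemma perMol (exp_groups sim_group : List (List String))
    (hPre : exp_groups.length ≤ sim_group.length)
    (j : Int) (h0 : 0 ≤ j) (h1 : j < (exp_groups.length : Int))
    (d : PySem.Dict String Int) (mol : String) :
    (if (PySem.List.pyGetD sim_group j []).contains mol then d.insert mol 0
     else (PySem.List.pyRange 0 ((exp_groups.length : Int) - 1) 1).foldl (fun e i =>
        if (PySem.List.pyGetD sim_group (PySem.Int.mod (j + 1 + i) (exp_groups.length : Int)) []).contains mol then
          e.insert mol (1 + i)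
        else e) d)
    = (let js := (group_metric_alt_pos (exp_groups.length : Int) sim_group).getD mol []
       if js = [] then d
       else if js.contains j then d.insert mol 0
       else d.insert mol ((PySem.List.max? (js.map (fun jj => PySem.Int.mod (jj - j) (exp_groups.length : Int))) (fun x => x)).getD 0)) := by
  have hN : (0:Int) < (exp_groups.length : Int) := lt_of_le_of_lt h0 h1
  have hn1 : 1 ≤ exp_groups.length := by omega
  have hjn : j.toNat < exp_groups.length := by omega
  have hjlen : j < (sim_group.length : Int) := by
    have : ((exp_groups.length : Nat) : Int) ≤ (sim_group.length : Int) := by exact_mod_cast hPre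
    omega
  have hcond : ((PySem.List.pyGetD sim_group j []).contains mol = true) ↔ mol ∈ sim_group.getD j.toNat [] := by
    rw [PySem.List.pyGetD_eq_getElem _ _ h0 hjlen, List.contains_iff_mem,
        List.getD_eq_getElem _ _ (by omega)]
  rw [pos_getD]
  show _ = (if pvJs sim_group exp_groups.length mol = [] then d
       else if (pvJs sim_group exp_groups.length mol).contains j then d.insert mol 0
       else d.insert mol ((PySem.List.max? ((pvJs sim_group exp_groups.length mol).map (fun jj => PySem.Int.mod (jj - j) (exp_groups.length : Int))) (fun x => x)).getD 0))
  by_cases hmem : mol ∈ sim_group.getD j.toNat []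
  · rw [if_pos (hcond.mpr hmem)]
    have hjmem : j ∈ pvJs sim_group exp_groups.length mol :=
      (mem_pvJs sim_group _ hPre mol j).mpr ⟨j.toNat, hjn, by omega, hmem⟩
    rw [if_neg (List.ne_nil_of_mem hjmem), if_pos (List.contains_iff_mem.mpr hjmem)]
  · rw [if_neg (by rw [hcond]; exact hmem)]
    rw [foldl_insert_if]
    -- the two offset lists have the same elements
    have hmm : ∀ v : Int, v ∈ ((PySem.List.pyRange 0 ((exp_groups.length : Int) - 1) 1).filter
          (fun i => (PySem.List.pyGetD sim_group (PySem.Int.mod (j + 1 + i) (exp_groups.length : Int)) []).contains mol)).map (fun i => 1 + i)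
        ↔ v ∈ (pvJs sim_group exp_groups.length mol).map (fun jj => PySem.Int.mod (jj - j) (exp_groups.length : Int)) := by
      intro v
      simp only [List.mem_map, List.mem_filter, PySem.List.mem_pyRange_one,
        mem_pvJs sim_group _ hPre mol]
      constructor
      · rintro ⟨i, ⟨⟨hi0, hi1⟩, hPi⟩, rfl⟩
        have hm0 : 0 ≤ PySem.Int.mod (j + 1 + i) (exp_groups.length : Int) := PySem.Int.mod_nonneg _ hN
        have hm1 : PySem.Int.mod (j + 1 + i) (exp_groups.length : Int) < (exp_groups.length : Int) := PySem.Int.mod_lt _ hN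
        have hPi' : mol ∈ sim_group.getD (PySem.Int.mod (j + 1 + i) (exp_groups.length : Int)).toNat [] := by
          rw [PySem.List.pyGetD_eq_getElem _ _ hm0 (by omega), List.contains_iff_mem] at hPi
          rw [List.getD_eq_getElem _ _ (by omega)]; exact hPi
        refine ⟨PySem.Int.mod (j + 1 + i) (exp_groups.length : Int),
          ⟨(PySem.Int.mod (j + 1 + i) (exp_groups.length : Int)).toNat, by omega, by omega, hPi'⟩, ?_⟩
        rw [PySem.Int.mod_eq_emod_of_pos hN, PySem.Int.mod_eq_emod_of_pos hN, emod_sub_left]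
        have he : (j + 1 + i) - j = 1 + i := by ring
        rw [he, Int.emod_eq_of_lt (by omega) (by omega)]
      · rintro ⟨jj, ⟨k, hk, rfl, hmemk⟩, rfl⟩
        have hkj : (k : Int) ≠ j := by
          intro he
          have : j.toNat = k := by omega
          rw [this] at hmem; exact hmem hmemk
        have hv0 : 0 ≤ PySem.Int.mod ((k:Int) - j) (exp_groups.length : Int) := PySem.Int.mod_nonneg _ hN
        have hv1 : PySem.Int.mod ((k:Int) - j) (exp_groups.length : Int) < (exp_groups.length : Int) := PySem.Int.mod_lt _ hN
        have hvne : PySem.Int.mod ((k:Int) - j) (exp_groups.length : Int) ≠ 0 := by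
          intro h0'
          rw [PySem.Int.mod_eq_zero_iff_dvd] at h0'
          have : (k:Int) - j = 0 := Int.eq_zero_of_abs_lt_dvd h0' (by rw [abs_lt]; omega)
          exact hkj (by omega)
        refine ⟨PySem.Int.mod ((k:Int) - j) (exp_groups.length : Int) - 1, ⟨⟨by omega, by omega⟩, ?_⟩, by omega⟩
        have hidx : PySem.Int.mod (j + 1 + (PySem.Int.mod ((k:Int) - j) (exp_groups.length : Int) - 1)) (exp_groups.length : Int) = (k : Int) := by
          have h2 : j + 1 + (PySem.Int.mod ((k:Int) - j) (exp_groups.length : Int) - 1) = j + PySem.Int.mod ((k:Int) - j) (exp_groups.length : Int) := by ring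
          rw [h2, PySem.Int.mod_eq_emod_of_pos hN, PySem.Int.mod_eq_emod_of_pos hN, emod_add_right,
            Int.emod_eq_of_lt (by omega) (by omega)]
        rw [hidx, PySem.List.pyGetD_natCast, List.contains_iff_mem]
        exact hmemk
    have hpair : (((PySem.List.pyRange 0 ((exp_groups.length : Int) - 1) 1).filter
          (fun i => (PySem.List.pyGetD sim_group (PySem.Int.mod (j + 1 + i) (exp_groups.length : Int)) []).contains mol)).map (fun i => 1 + i)).Pairwise (· < ·) := by
      have hr : PySem.List.pyRange 0 ((exp_groups.length : Int) - 1) 1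
          = (List.range (exp_groups.length - 1)).map (fun k : Nat => (k:Int)) := by
        have h2 : ((exp_groups.length : Int) - 1) = ((exp_groups.length - 1 : Nat) : Int) := by omega
        rw [h2, PySem.List.pyRange_zero_natCast]
      rw [hr]
      have hbase : ((List.range (exp_groups.length - 1)).map (fun k : Nat => (k:Int))).Pairwise (· < ·) :=
        List.Pairwise.map (f := fun k : Nat => (k:Int)) (fun a b hab => Int.ofNat_lt.mpr hab) List.pairwise_lt_range
      exact List.Pairwise.map (f := fun i : Int => 1 + i)
        (fun a b hab => show 1 + a < 1 + b by omega) (List.Pairwise.filter _ hbase)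
    cases hLast : ((PySem.List.pyRange 0 ((exp_groups.length : Int) - 1) 1).filter
        (fun i => (PySem.List.pyGetD sim_group (PySem.Int.mod (j + 1 + i) (exp_groups.length : Int)) []).contains mol)).getLast? with
    | none =>
      have hfilnil := List.getLast?_eq_none_iff.mp hLast
      have hjsnil : pvJs sim_group exp_groups.length mol = [] := by
        rw [List.eq_nil_iff_forall_not_mem]
        intro jj hjj
        have hv : PySem.Int.mod (jj - j) (exp_groups.length : Int)
            ∈ (pvJs sim_group exp_groups.length mol).map (fun jj => PySem.Int.mod (jj - j) (exp_groups.length : Int)) :=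
          List.mem_map.mpr ⟨jj, hjj, rfl⟩
        rw [← hmm] at hv
        rw [hfilnil] at hv
        simp at hv
      rw [if_pos hjsnil]
    | some i =>
      have hifil := List.mem_of_getLast? hLast
      have hiv : (1 + i) ∈ (pvJs sim_group exp_groups.length mol).map (fun jj => PySem.Int.mod (jj - j) (exp_groups.length : Int)) := by
        rw [← hmm]; exact List.mem_map.mpr ⟨i, hifil, rfl⟩
      obtain ⟨jj, hjj, _⟩ := List.mem_map.mp hiv
      have hjsne : pvJs sim_group exp_groups.length mol ≠ [] := List.ne_nil_of_mem hjj
      have hnc : ¬ ((pvJs sim_group exp_groups.length mol).contains j = true) := by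
        rw [List.contains_iff_mem, mem_pvJs sim_group _ hPre mol]
        rintro ⟨k, hk, hkj, hmemk⟩
        have : j.toNat = k := by omega
        rw [this] at hmem; exact hmem hmemk
      rw [if_neg hjsne, if_neg hnc]
      have hmax : PySem.List.max? ((pvJs sim_group exp_groups.length mol).map
          (fun jj => PySem.Int.mod (jj - j) (exp_groups.length : Int))) (fun x => x) = some (1 + i) := by
        rw [← max?_congr_mem _ _ hmm, max?_eq_getLast?_of_pairwise_lt _ hpair, List.getLast?_map, hLast]
        rfl
      rw [hmax]
      rfl

-- ===== VERDICT (by name: the statement is the Claim_ definition above) =====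
theorem group_metric_spec : Claim_equal_group_metric := by
  intro exp_groups sim_group _hDom hPre
  unfold Spec_group_metric group_metric group_metric_alt
  rw [PySem.List.enumerate_eq_map_pyRange exp_groups []]
  simp only [PySem.List.len_eq, List.foldl_map]
  congr 1
  apply PySem.List.foldl_congr_mem
  intro acc jg hj
  rw [PySem.List.mem_pyRange_one] at hj
  apply PySem.List.foldl_congr_mem
  intro d mol _
  exact perMol exp_groups sim_group hPre jg hj.1 hj.2 d mol
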